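-- pv_equiv track=rewrite | github.com/keerockl/PerfKitBenchmarker | perfkitbenchmarker/linux_benchmarks/nccl_benchmark.py | _TuningPatameters
-- ===== SOURCE A (Python) =====
-- _DEFAULT = 'DEFAULT'
--
-- def _TuningPatameters(params):
--   """Get all NCCL tuning parameters combination.
--
--   For example:
--   params = [
--       ('NCCL_NSOCKS_PERTHREAD', ['DEFAULT', '2']),
--       ('NCCL_SOCKET_NTHREADS', ['DEFAULT', '8']),
--   ]
--
--   result = [
--       [],
--       [('NCCL_NSOCKS_PERTHREAD', '2')],
--       [('NCCL_SOCKET_NTHREADS', '8')],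
--       [('NCCL_NSOCKS_PERTHREAD', '2'), ('NCCL_SOCKET_NTHREADS', '8')],
--   ]
--
--   Args:
--     params: list of (parameter name and a list of parameter value)
--
--   Returns:
--     a list of all NCCL tuning patameters combination.
--   """
--   if not params:
--     return [[]]
--   param_key, param_value_list = params.pop()
--   result = []
--   for param in _TuningPatameters(params):
--     for param_value in param_value_list:
--       param_args = [] if param_value == _DEFAULT else [(param_key, param_value)]
--       result.append(param + param_args)
--   return result
-- ===== SOURCE B (Python) =====
-- _DEFAULT = 'DEFAULT'
--
-- def _TuningPatameters(params):
--   # Iterative front-to-back product; like A it consumes (empties) params in place.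
--   result = [[]]
--   while params:
--     key, values = params.pop(0)
--     result = [combo + ([] if v == _DEFAULT else [(key, v)])
--               for combo in result for v in values]
--   return result
-- ===== Notes on version B (the rewrite author's own statement) =====
-- stated objective: alternative
-- what changed: Replaced the back-to-front recursion (pop from the end, recurse, nested append loops) with an iterative front-to-back loop that starts from [[]] and extends every partial combination by each value of the next parameter; same cost, no recursion.
import Mathlib
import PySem

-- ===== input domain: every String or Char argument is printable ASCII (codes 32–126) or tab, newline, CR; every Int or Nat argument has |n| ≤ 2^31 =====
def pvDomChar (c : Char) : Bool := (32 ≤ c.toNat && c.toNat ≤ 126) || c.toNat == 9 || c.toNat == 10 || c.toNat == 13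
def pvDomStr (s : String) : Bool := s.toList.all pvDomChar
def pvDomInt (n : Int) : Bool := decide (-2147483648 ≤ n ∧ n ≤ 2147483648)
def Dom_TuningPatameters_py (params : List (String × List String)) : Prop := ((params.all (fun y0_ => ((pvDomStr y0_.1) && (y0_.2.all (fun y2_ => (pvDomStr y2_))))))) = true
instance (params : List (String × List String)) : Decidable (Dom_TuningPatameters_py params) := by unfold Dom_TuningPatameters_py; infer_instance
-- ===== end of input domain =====

-- B replaces A's back-to-front recursion by an iterative front-to-back product loop (same cost,
-- no recursion); like A, B empties its argument list in place — the equivalence proved is about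
-- the return value.


-- ===== PORT A =====
-- A: if not params: return [[]]; pop the LAST pair, recurse on the rest, then nested append loops.
def TuningPatameters_py (params : List (String × List String)) : List (List (String × String)) :=
  if hp : params = [] then [[]]
  else
    let kv := params.getLast hp
    (TuningPatameters_py params.dropLast).foldl
      (fun result param =>
        kv.2.foldl (fun result v =>
          result ++ [param ++ (if v == "DEFAULT" then [] else [(kv.1, v)])]) result) []
termination_by params.length
decreasing_by
  have := List.length_pos_of_ne_nil hp
  simp [List.length_dropLast]; omega

-- ===== PORT B =====
-- B's while loop: pop(0) the first pair, extend every partial combo by each of its values.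
def pvAltLoop : List (String × List String) → List (List (String × String)) → List (List (String × String))
  | [], result => result
  | (key, values) :: rest, result =>
      pvAltLoop rest
        (result.flatMap (fun combo =>
          values.map (fun v => combo ++ (if v == "DEFAULT" then [] else [(key, v)]))))

def TuningPatameters_py_alt (params : List (String × List String)) : List (List (String × String)) :=
  pvAltLoop params [[]]

-- ===== PRECONDITION & SPEC =====
def Spec_TuningPatameters_py (params : List (String × List String)) (out : List (List (String × String))) : Prop := out = TuningPatameters_py_alt params
instance (params : List (String × List String)) (out : List (List (String × String))) : Decidable (Spec_TuningPatameters_py params out) := by unfold Spec_TuningPatameters_py; infer_instance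

-- ===== CLAIM (what is proved, stated in full; the proofs are below) =====
def Claim_equal_TuningPatameters_py : Prop := ∀ (params : List (String × List String)), Dom_TuningPatameters_py params → Spec_TuningPatameters_py params (TuningPatameters_py params)

-- ===== LEMMAS AND PROOFS =====

-- one step of extending all combinations by parameter kv
def pvStep (kv : String × List String) (res : List (List (String × String))) : List (List (String × String)) :=
  res.flatMap (fun combo =>
    kv.2.map (fun v => combo ++ (if v == "DEFAULT" then [] else [(kv.1, v)])))

theorem pvA_snoc (xs : List (String × List String)) (x : String × List String) :
    TuningPatameters_py (xs ++ [x]) = pvStep x (TuningPatameters_py xs) := by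
  rw [TuningPatameters_py]
  simp only [List.dropLast_concat, PySem.List.foldl_append_singleton_eq_map,
    PySem.List.foldl_append_eq_flatMap, List.nil_append, pvStep]
  simp

theorem pvLoop_snoc (xs : List (String × List String)) (x : String × List String)
    (res : List (List (String × String))) :
    pvAltLoop (xs ++ [x]) res = pvStep x (pvAltLoop xs res) := by
  induction xs generalizing res with
  | nil => simp [pvAltLoop, pvStep]
  | cons y ys ih => exact ih _

-- ===== VERDICT (by name: the statement is the Claim_ definition above) =====
theorem TuningPatameters_py_spec : Claim_equal_TuningPatameters_py := by
  intro params hd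
  clear hd
  unfold Spec_TuningPatameters_py TuningPatameters_py_alt
  induction params using List.reverseRecOn with
  | nil => simp [TuningPatameters_py, pvAltLoop]
  | append_singleton xs x ih => rw [pvA_snoc, pvLoop_snoc, ih]
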